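-- pv_equiv track=rewrite | github.com/EngelsI/Palaeobot | tagPALAEO.py | find_seq
-- ===== SOURCE A (Python) =====
-- def find_seq(crap, reform_peptide):
--     final_result = {}
--     for peptides in reform_peptide:
--         peptide = peptides[1]
--         for sequence, name in crap.items():
--             if peptide in sequence:
--                 if str(name) in final_result.keys():
--                     final_result[str(name)] = final_result[str(name)]+[peptides]
--                 else:
--                     final_result[str(name)] = [peptides]
--     return final_result
-- ===== SOURCE B (Python) =====
-- def find_seq(crap, reform_peptide):
--     # Cache, per distinct peptide string, the list of matching sequence names
--     # (in crap order), so repeated peptide strings scan the sequences only once.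
--     items = list(crap.items())
--     memo = {}
--     result = {}
--     for peptides in reform_peptide:
--         pep = peptides[1]
--         names = memo.get(pep)
--         if names is None:
--             names = [name for sequence, name in items if pep in sequence]
--             memo[pep] = names
--         for name in names:
--             if name in result:
--                 result[name].append(peptides)
--             else:
--                 result[name] = [peptides]
--     return result
-- ===== Notes on version B (the rewrite author's own statement) =====
-- stated objective: alternative
-- what changed: B caches, per distinct peptide string, the list of matching sequence names (built once by a single filtered scan of the dict items) and then only replays the cached name list for every repeated peptide, instead of re-scanning all sequences for every peptide entry.
import Mathlib
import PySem

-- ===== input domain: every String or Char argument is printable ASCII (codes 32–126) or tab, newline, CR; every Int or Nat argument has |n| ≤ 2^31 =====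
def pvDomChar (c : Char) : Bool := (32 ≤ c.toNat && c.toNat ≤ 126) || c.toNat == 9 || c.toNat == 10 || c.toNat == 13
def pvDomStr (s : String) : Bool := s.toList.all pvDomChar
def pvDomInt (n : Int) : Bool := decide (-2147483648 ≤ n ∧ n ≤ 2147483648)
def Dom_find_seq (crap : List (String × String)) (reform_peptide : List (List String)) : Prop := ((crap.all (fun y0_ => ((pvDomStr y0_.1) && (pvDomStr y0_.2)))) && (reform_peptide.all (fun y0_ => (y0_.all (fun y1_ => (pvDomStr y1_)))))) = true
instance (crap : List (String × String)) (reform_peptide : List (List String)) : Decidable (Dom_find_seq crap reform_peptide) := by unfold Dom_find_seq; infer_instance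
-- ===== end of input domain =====

-- B memoises the name list per distinct peptide string; return-value equivalence with A is proved on all
-- inputs where every peptide entry has at least two elements (A raises IndexError otherwise).

-- ===== PORT A =====
-- the dict update 'final_result[str(name)] = final_result[str(name)]+[peptides] / [peptides]'
-- (identical lines in both Pythons)
def pvGrow (peptides : List String) (fr : PySem.Dict String (List (List String))) (name : String) : PySem.Dict String (List (List String)) :=
  match fr.get? name with
  | some v => fr.insert name (v ++ [peptides])
  | none   => fr.insert name [peptides]

def find_seq (crap : List (String × String)) (reform_peptide : List (List String)) : List (String × List (List String)) :=
  (reform_peptide.foldl (fun fr peptides =>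
      match PySem.List.pyGet? peptides 1 with
      | none => fr  -- Python raises IndexError here; excluded by Pre_find_seq
      | some peptide =>
        (PySem.Dict.ofList crap).items.foldl
          (fun fr sn => if PySem.Str.isIn peptide sn.1 then pvGrow peptides fr sn.2 else fr) fr)
    PySem.Dict.empty).items

-- ===== PORT B =====
-- '[name for sequence, name in items if pep in sequence]'
def pvNamesFor (items : List (String × String)) (pep : String) : List String :=
  (items.filter (fun sn => PySem.Str.isIn pep sn.1)).map Prod.snd

def find_seq_alt (crap : List (String × String)) (reform_peptide : List (List String)) : List (String × List (List String)) :=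
  let items := (PySem.Dict.ofList crap).items
  ((reform_peptide.foldl
      (fun (st : PySem.Dict String (List String) × PySem.Dict String (List (List String))) peptides =>
        match PySem.List.pyGet? peptides 1 with
        | none => st  -- Python raises IndexError here; excluded by Pre_find_seq
        | some pep =>
          let nm :=
            match st.1.get? pep with
            | some ns => (ns, st.1)
            | none => let ns := pvNamesFor items pep; (ns, st.1.insert pep ns)
          (nm.2, nm.1.foldl (pvGrow peptides) st.2))
      (PySem.Dict.empty, PySem.Dict.empty)).2).items

-- ===== PRECONDITION & SPEC =====
-- Pre_ excludes exactly the inputs on which A raises IndexError at 'peptides[1]'.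
def Pre_find_seq (crap : List (String × String)) (reform_peptide : List (List String)) : Prop :=
  ∀ p ∈ reform_peptide, 2 ≤ p.length
instance (crap : List (String × String)) (reform_peptide : List (List String)) : Decidable (Pre_find_seq crap reform_peptide) := by unfold Pre_find_seq; infer_instance
def pvWitness_find_seq : (List (String × String)) × List (List String) :=
  ([("ABC", "n1"), ("BCD", "n2")], [["x", "B"], ["y", "CD"], ["z", "B"]])
def Spec_find_seq (crap : List (String × String)) (reform_peptide : List (List String)) (out : List (String × List (List String))) : Prop := out = find_seq_alt crap reform_peptide
instance (crap : List (String × String)) (reform_peptide : List (List String)) (out : List (String × List (List String))) : Decidable (Spec_find_seq crap reform_peptide out) := by unfold Spec_find_seq; infer_instance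

-- ===== CLAIM (what is proved, stated in full; the proofs are below) =====
def Claim_equal_find_seq : Prop := ∀ (crap : List (String × String)) (reform_peptide : List (List String)), Dom_find_seq crap reform_peptide → Pre_find_seq crap reform_peptide → Spec_find_seq crap reform_peptide (find_seq crap reform_peptide)

-- ===== LEMMAS AND PROOFS =====

-- a fold that skips non-p elements is a fold over the filtered-and-projected list
lemma foldl_filter_map {α β γ : Type} (l : List α) (p : α → Bool) (g : α → γ)
    (f : β → γ → β) (b : β) :
    l.foldl (fun acc a => if p a then f acc (g a) else acc) b
      = ((l.filter p).map g).foldl f b := by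
  induction l generalizing b with
  | nil => rfl
  | cons x xs ih => by_cases h : p x <;> simp [h, ih]

-- memo invariant: every cached entry is the correct name list
def pvInv (items : List (String × String)) (memo : PySem.Dict String (List String)) : Prop :=
  ∀ k ns, memo.get? k = some ns → ns = pvNamesFor items k

lemma pvInv_empty (items : List (String × String)) : pvInv items PySem.Dict.empty := by
  intro k ns h; simp [PySem.Dict.get?_empty] at h

lemma pvInv_insert (items : List (String × String)) (memo : PySem.Dict String (List String))
    (pep : String) (h : pvInv items memo) :
    pvInv items (memo.insert pep (pvNamesFor items pep)) := by
  intro k ns hk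
  rw [PySem.Dict.get?_insert] at hk
  split at hk
  · cases hk; subst ‹k = pep›; rfl
  · exact h k ns hk

lemma loop_eq (crap : List (String × String)) (reform : List (List String)) :
    ∀ (memo : PySem.Dict String (List String)) (fr : PySem.Dict String (List (List String))),
      pvInv ((PySem.Dict.ofList crap).items) memo →
      (reform.foldl
        (fun (st : PySem.Dict String (List String) × PySem.Dict String (List (List String))) peptides =>
          match PySem.List.pyGet? peptides 1 with
          | none => st
          | some pep =>
            let nm :=
              match st.1.get? pep with
              | some ns => (ns, st.1)
              | none => let ns := pvNamesFor ((PySem.Dict.ofList crap).items) pep;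
                        (ns, st.1.insert pep ns)
            (nm.2, nm.1.foldl (pvGrow peptides) st.2))
        (memo, fr)).2
      = reform.foldl (fun fr peptides =>
          match PySem.List.pyGet? peptides 1 with
          | none => fr
          | some peptide =>
            (PySem.Dict.ofList crap).items.foldl
              (fun fr sn => if PySem.Str.isIn peptide sn.1 then pvGrow peptides fr sn.2 else fr) fr)
          fr := by
  induction reform with
  | nil => intro memo fr _; rfl
  | cons pth rest ih =>
    intro memo fr hinv
    simp only [List.foldl_cons]
    cases hg : PySem.List.pyGet? pth 1 with
    | none => exact ih memo fr hinv
    | some pep =>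
      have hA : (PySem.Dict.ofList crap).items.foldl
          (fun fr sn => if PySem.Str.isIn pep sn.1 then pvGrow pth fr sn.2 else fr) fr
          = (pvNamesFor ((PySem.Dict.ofList crap).items) pep).foldl (pvGrow pth) fr := by
        simpa [pvNamesFor] using
          foldl_filter_map ((PySem.Dict.ofList crap).items)
            (fun sn => PySem.Str.isIn pep sn.1) Prod.snd (pvGrow pth) fr
      cases hm : memo.get? pep with
      | some ns =>
        have hns : ns = pvNamesFor ((PySem.Dict.ofList crap).items) pep := hinv pep ns hm
        simp only [hm, hA, ← hns]
        exact ih memo _ hinv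
      | none =>
        simp only [hm, hA]
        exact ih _ _ (pvInv_insert _ memo pep hinv)

-- ===== VERDICT (by name: the statement is the Claim_ definition above) =====
theorem find_seq_spec : Claim_equal_find_seq := by
  intro crap reform _ _
  unfold Spec_find_seq find_seq find_seq_alt
  exact congrArg PySem.Dict.items
    (loop_eq crap reform PySem.Dict.empty PySem.Dict.empty (pvInv_empty _)).symm
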